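-- pv_equiv track=rewrite | github.com/anmolsahu2k/WhatsApp-Twin | src/whatsapp_twin/ingestion/style_analyzer.py | _detect_greetings
-- ===== SOURCE A (Python) =====
-- def _detect_greetings(texts: list[str]) -> list[str]:
--     """Detect greeting patterns."""
--     greetings = ["hey", "hi", "hello", "yo", "sup", "heyyy", "heyy",
--                  "hii", "hiiii", "wassup", "namaste"]
--     found = []
--     for g in greetings:
--         for text in texts:
--             if text.lower().startswith(g):
--                 found.append(g)
--                 break
--     return found
-- ===== SOURCE B (Python) =====
-- def _detect_greetings(texts: list[str]) -> list[str]: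
--     """Detect greeting patterns."""
--     greetings = ["hey", "hi", "hello", "yo", "sup", "heyyy", "heyy",
--                  "hii", "hiiii", "wassup", "namaste"]
--     maxlen = max(len(g) for g in greetings)
--     # Index phase: collect every nonempty lowercased prefix (up to maxlen)
--     # of every text into one hash set; no startswith tests at all.
--     prefixes = set()
--     for text in texts:
--         low = text.lower()
--         for i in range(1, min(len(low), maxlen) + 1):
--             prefixes.add(low[:i])
--     # Lookup phase: a greeting is found iff it IS one of those prefixes.
--     return [g for g in greetings if g in prefixes]
-- ===== Notes on version B (the rewrite author's own statement) =====
-- stated objective: faster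
-- what changed: B builds a hash-set index of every nonempty lowercased prefix (up to the maximum greeting length) of every text in one pass, then answers each greeting by a single set-membership lookup; A instead rescans the text list with startswith for every greeting.
import Mathlib
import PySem

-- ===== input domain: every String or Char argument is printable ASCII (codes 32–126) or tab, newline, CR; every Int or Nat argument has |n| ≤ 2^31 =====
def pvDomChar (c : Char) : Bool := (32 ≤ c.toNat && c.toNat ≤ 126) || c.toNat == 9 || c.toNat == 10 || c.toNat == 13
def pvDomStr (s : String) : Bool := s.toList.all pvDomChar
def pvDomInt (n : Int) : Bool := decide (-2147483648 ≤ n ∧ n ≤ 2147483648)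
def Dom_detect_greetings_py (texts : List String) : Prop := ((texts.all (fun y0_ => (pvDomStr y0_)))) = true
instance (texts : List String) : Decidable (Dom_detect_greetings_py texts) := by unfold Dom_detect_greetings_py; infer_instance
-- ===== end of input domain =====

-- B replaces A's per-greeting startswith scans by one prefix-set index of the
-- texts followed by a membership lookup per greeting; alternative algorithm,
-- same result.

def pvGreetings : List String :=
  ["hey", "hi", "hello", "yo", "sup", "heyyy", "heyy", "hii", "hiiii", "wassup", "namaste"]

-- ===== PORT A =====
-- inner 'for text in texts: if text.lower().startswith(g): found.append(g); break'
def pvAInner (g : String) (found : List String) : List String → List String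
  | [] => found
  | t :: ts =>
      if PySem.Str.startswith (PySem.Str.lower t) g then found ++ [g]
      else pvAInner g found ts

def detect_greetings_py (texts : List String) : List String :=
  pvGreetings.foldl (fun found g => pvAInner g found texts) []

-- ===== PORT B =====
-- maxlen = max(len(g) for g in greetings); the generator is nonempty (constant
-- list), so Python's max returns (the .getD 0 default is unreachable)
def pvMaxlen : Int :=
  (PySem.List.max? (pvGreetings.map (fun g => PySem.Str.len g)) (fun x => x)).getD 0

-- loop body: 'low = text.lower(); for i in range(1, min(len(low), maxlen)+1): prefixes.add(low[:i])'
def pvAddPrefixes (m : PySem.Set String) (t : String) : PySem.Set String :=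
  let low := PySem.Str.lower t
  (PySem.List.pyRange 1 (min (PySem.Str.len low) pvMaxlen + 1) 1).foldl
    (fun m i => PySem.Set.add m (PySem.Str.slice low none (some i))) m

def detect_greetings_py_alt (texts : List String) : List String :=
  let prefixes : PySem.Set String := texts.foldl pvAddPrefixes PySem.Set.empty
  pvGreetings.filter (fun g => PySem.Set.contains prefixes g)

-- ===== PRECONDITION & SPEC =====
def Spec_detect_greetings_py (texts : List String) (out : List String) : Prop := out = detect_greetings_py_alt texts
instance (texts : List String) (out : List String) : Decidable (Spec_detect_greetings_py texts out) := by unfold Spec_detect_greetings_py; infer_instance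

-- ===== CLAIM (what is proved, stated in full; the proofs are below) =====
def Claim_equal_detect_greetings_py : Prop := ∀ (texts : List String), Dom_detect_greetings_py texts → Spec_detect_greetings_py texts (detect_greetings_py texts)

-- ===== LEMMAS AND PROOFS =====

-- A's inner loop is 'append g iff some text matches'
theorem pvAInner_eq (g : String) (found : List String) (texts : List String) :
    pvAInner g found texts =
      if texts.any (fun t => PySem.Str.startswith (PySem.Str.lower t) g) then found ++ [g]
      else found := by
  induction texts with
  | nil => rfl
  | cons t ts ih =>
      cases h : PySem.Str.startswith (PySem.Str.lower t) g with
      | true => simp only [pvAInner, h, List.any_cons, Bool.true_or, if_true]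
      | false => simp only [pvAInner, h, List.any_cons, Bool.false_or, Bool.false_eq_true, if_false, ih]

-- A's outer fold produces 'found ++ filter c' for any boolean condition agreeing with the any-test
theorem pvFoldA (texts : List String) (c : String → Bool) :
    ∀ (gs : List String), (∀ g ∈ gs,
        c g = texts.any (fun t => PySem.Str.startswith (PySem.Str.lower t) g)) →
      ∀ (found : List String),
        gs.foldl (fun found g => pvAInner g found texts) found = found ++ gs.filter c := by
  intro gs
  induction gs with
  | nil => intro _ found; simp
  | cons g gs ih =>
      intro hc found
      have hg := hc g (List.mem_cons_self ..)
      have hgs : ∀ x ∈ gs, c x = texts.any (fun t => PySem.Str.startswith (PySem.Str.lower t) x) :=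
        fun x hx => hc x (List.mem_cons_of_mem _ hx)
      rw [List.foldl_cons, List.filter_cons, pvAInner_eq, ← hg, ih hgs]
      cases h : c g with
      | true => simp
      | false => simp

-- membership after folding Set.add of f i over a list
theorem pvMem_foldl_add (f : Int → String) (l : List Int) (m : PySem.Set String) (x : String) :
    (x ∈ l.foldl (fun m i => PySem.Set.add m (f i)) m) ↔ x ∈ m ∨ ∃ i ∈ l, f i = x := by
  induction l generalizing m with
  | nil => simp
  | cons i l ih =>
      rw [List.foldl_cons, ih]
      simp only [PySem.Set.mem_add, List.mem_cons]
      constructor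
      · rintro (⟨hm | rfl⟩ | ⟨j, hj, hf⟩)
        · exact Or.inl hm
        · exact Or.inr ⟨i, Or.inl rfl, rfl⟩
        · exact Or.inr ⟨j, Or.inr hj, hf⟩
      · rintro (hm | ⟨j, (rfl | hj), hf⟩)
        · exact Or.inl (Or.inl hm)
        · exact Or.inl (Or.inr hf.symm)
        · exact Or.inr ⟨j, hj, hf⟩

-- the per-text prefix condition B's index records
def pvQ (t x : String) : Prop :=
  ∃ i ∈ PySem.List.pyRange 1 (min (PySem.Str.len (PySem.Str.lower t)) pvMaxlen + 1) 1,
    PySem.Str.slice (PySem.Str.lower t) none (some i) = x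

theorem pvMem_addPrefixes (t : String) (m : PySem.Set String) (x : String) :
    x ∈ pvAddPrefixes m t ↔ x ∈ m ∨ pvQ t x := by
  unfold pvAddPrefixes pvQ
  exact pvMem_foldl_add _ _ m x

theorem pvMem_outer (texts : List String) (m : PySem.Set String) (x : String) :
    (x ∈ texts.foldl pvAddPrefixes m) ↔ x ∈ m ∨ ∃ t ∈ texts, pvQ t x := by
  induction texts generalizing m with
  | nil => simp
  | cons t ts ih =>
      rw [List.foldl_cons, ih, pvMem_addPrefixes]
      simp only [List.mem_cons]
      constructor
      · rintro (⟨hm | hq⟩ | ⟨u, hu, hq⟩)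
        · exact Or.inl hm
        · exact Or.inr ⟨t, Or.inl rfl, hq⟩
        · exact Or.inr ⟨u, Or.inr hu, hq⟩
      · rintro (hm | ⟨u, (rfl | hu), hq⟩)
        · exact Or.inl (Or.inl hm)
        · exact Or.inl (Or.inr hq)
        · exact Or.inr ⟨u, hu, hq⟩

theorem pvMaxlen_eq : pvMaxlen = 7 := by decide

theorem pvGreetings_len : ∀ g ∈ pvGreetings, 1 ≤ g.toList.length ∧ g.toList.length ≤ 7 := by
  decide

-- a bounded-length greeting is in the prefix index of t iff t.lower() starts with it
theorem pvQ_iff_startswith (t g : String)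
    (h1 : 1 ≤ g.toList.length) (h7 : g.toList.length ≤ 7) :
    pvQ t g ↔ PySem.Str.startswith (PySem.Str.lower t) g = true := by
  unfold pvQ
  rw [pvMaxlen_eq, PySem.Str.startswith_eq, PySem.Chars.startswith_iff]
  constructor
  · rintro ⟨i, hi, hsl⟩
    rw [PySem.List.mem_pyRange_one] at hi
    have h0 : (0:Int) ≤ i := by omega
    have := congrArg String.toList hsl
    rw [PySem.Str.toList_slice] at this
    have h2 : (PySem.Str.lower t).toList.take i.toNat = g.toList :=
      (PySem.List.slice_to (PySem.Str.lower t).toList h0).symm.trans this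
    rw [← h2]
    exact List.take_prefix _ _
  · intro hpre
    refine ⟨(g.toList.length : Int), ?_, ?_⟩
    · rw [PySem.List.mem_pyRange_one]
      have hle := hpre.length_le
      rw [PySem.Str.len_eq]
      omega
    · rw [← String.toList_inj, PySem.Str.toList_slice]
      refine (PySem.List.slice_to (PySem.Str.lower t).toList (Int.natCast_nonneg _)).trans ?_
      simp only [Int.toNat_natCast]
      exact (List.prefix_iff_eq_take.mp hpre).symm

theorem pvMain (texts : List String) :
    detect_greetings_py texts = detect_greetings_py_alt texts := by
  show pvGreetings.foldl (fun found g => pvAInner g found texts) [] =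
    pvGreetings.filter (fun g =>
      PySem.Set.contains (texts.foldl pvAddPrefixes PySem.Set.empty) g)
  rw [pvFoldA texts _ pvGreetings ?_ []]
  · exact (List.nil_append _).symm
  · intro g hg
    obtain ⟨hg1, hg7⟩ := pvGreetings_len g hg
    cases h : texts.any (fun t => PySem.Str.startswith (PySem.Str.lower t) g) with
    | true =>
        rw [List.any_eq_true] at h
        obtain ⟨t, ht, hs⟩ := h
        rw [show (PySem.Set.contains _ g = true) = (g ∈ _) from
          propext (PySem.Set.contains_iff _ _), pvMem_outer]
        exact Or.inr ⟨t, ht, (pvQ_iff_startswith t g hg1 hg7).mpr hs⟩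
    | false =>
        rw [Bool.eq_false_iff]
        intro hcon
        rw [PySem.Set.contains_iff, pvMem_outer] at hcon
        rcases hcon with hm | ⟨t, ht, hq⟩
        · exact absurd hm (by simp [PySem.Set.empty])
        · have hs := (pvQ_iff_startswith t g hg1 hg7).mp hq
          have : texts.any (fun t => PySem.Str.startswith (PySem.Str.lower t) g) = true :=
            List.any_eq_true.mpr ⟨t, ht, hs⟩
          rw [h] at this
          exact Bool.false_ne_true this

-- ===== VERDICT (by name: the statement is the Claim_ definition above) =====
theorem detect_greetings_py_spec : Claim_equal_detect_greetings_py := by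
  intro texts _
  unfold Spec_detect_greetings_py
  exact pvMain texts
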